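-- pv_equiv track=rewrite | github.com/TDiblik/main-gate-alpr | server/server.py | validate_results_between_rounds
-- ===== SOURCE A (Python) =====
-- def validate_results_between_rounds(recognitions_between_rounds: list[list[(any, any, str)]], number_of_occurrences_to_be_valid: int):
--     license_plate_counts = {}
--     for recognitions in recognitions_between_rounds:
--         for _, _, license_plate_as_string in recognitions:
--             if license_plate_as_string in license_plate_counts:
--                 license_plate_counts[license_plate_as_string] += 1
--             else:
--                 license_plate_counts[license_plate_as_string] = 1
--
--     validated_recognitions = []
--     for license_plate, times_found in license_plate_counts.items():
--         if times_found < number_of_occurrences_to_be_valid: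
--             continue
--
--         should_break_recognitions_loop = False
--         for recognitions in recognitions_between_rounds:
--             if should_break_recognitions_loop: break
--             for recognized_car_image, recognized_license_plate_image, recognized_license_plate_as_string in recognitions:
--                 if should_break_recognitions_loop: break
--                 if license_plate == recognized_license_plate_as_string:
--                     validated_recognitions.append((recognized_car_image, recognized_license_plate_image, recognized_license_plate_as_string))
--                     should_break_recognitions_loop = True
--
--     return validated_recognitions
-- ===== SOURCE B (Python) =====
-- def validate_results_between_rounds(recognitions_between_rounds, number_of_occurrences_to_be_valid):
--     flat = [item for recognitions in recognitions_between_rounds for item in recognitions]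
--     plates = [item[2] for item in flat]
--     return [item for i, item in enumerate(flat)
--             if plates.count(item[2]) >= number_of_occurrences_to_be_valid
--             and plates.index(item[2]) == i]
-- ===== Notes on version B (the rewrite author's own statement) =====
-- stated objective: simpler
-- what changed: B flattens the nested list once and keeps, via a single comprehension, the first occurrence of each plate whose total count meets the threshold (count/index over the flat plate list), replacing A's counts dict and per-plate break-controlled rescans of the nested input.
import Mathlib
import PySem

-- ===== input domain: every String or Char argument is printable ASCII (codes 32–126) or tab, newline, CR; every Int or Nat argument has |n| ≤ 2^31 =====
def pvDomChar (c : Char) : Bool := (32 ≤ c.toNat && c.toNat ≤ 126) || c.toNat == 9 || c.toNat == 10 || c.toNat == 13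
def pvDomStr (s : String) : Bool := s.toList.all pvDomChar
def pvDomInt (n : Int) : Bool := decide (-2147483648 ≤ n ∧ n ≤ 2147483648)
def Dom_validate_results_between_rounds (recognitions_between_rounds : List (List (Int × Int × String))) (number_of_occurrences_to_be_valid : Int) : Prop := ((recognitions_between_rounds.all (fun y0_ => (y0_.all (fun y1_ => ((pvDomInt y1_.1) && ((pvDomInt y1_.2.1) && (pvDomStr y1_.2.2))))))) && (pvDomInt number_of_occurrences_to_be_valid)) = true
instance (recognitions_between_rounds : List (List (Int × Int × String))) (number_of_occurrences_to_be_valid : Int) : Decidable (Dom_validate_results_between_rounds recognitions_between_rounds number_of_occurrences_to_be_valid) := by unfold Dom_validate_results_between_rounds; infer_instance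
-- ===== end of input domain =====

-- B flattens the input once and keeps, in one comprehension, the first occurrence of each
-- plate whose total count meets the threshold; same return value on every input.

-- ===== PORT A =====
-- Port of A: counts dict built by a nested loop, then for each dict item with enough
-- occurrences a full break-controlled rescan of the nested input for the first match.
def validate_results_between_rounds (recognitions_between_rounds : List (List (Int × Int × String))) (number_of_occurrences_to_be_valid : Int) : List (Int × Int × String) :=
  let license_plate_counts : PySem.Dict String Int :=
    recognitions_between_rounds.foldl (fun d recognitions =>
      recognitions.foldl (fun d t =>
        if d.contains t.2.2 then d.insert t.2.2 (d.getD t.2.2 0 + 1)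
        else d.insert t.2.2 1) d) PySem.Dict.empty
  license_plate_counts.items.foldl (fun validated_recognitions pc =>
    if pc.2 < number_of_occurrences_to_be_valid then validated_recognitions
    else
      (recognitions_between_rounds.foldl
        (fun (s : List (Int × Int × String) × Bool) recognitions =>
          if s.2 then s
          else recognitions.foldl (fun s t =>
            if s.2 then s
            else if pc.1 == t.2.2 then (s.1 ++ [t], true) else s) s)
        (validated_recognitions, false)).1) []

-- ===== PORT B =====
-- Port of B: flatten once; plates list; one comprehension keeping an item iff its plate's
-- count meets the threshold and this is the plate's first position (index == i).
def validate_results_between_rounds_alt (recognitions_between_rounds : List (List (Int × Int × String))) (number_of_occurrences_to_be_valid : Int) : List (Int × Int × String) :=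
  let flat : List (Int × Int × String) := recognitions_between_rounds.flatMap id
  let plates : List String := flat.map (fun item => item.2.2)
  (PySem.List.enumerate flat).filterMap (fun it =>
    if decide (number_of_occurrences_to_be_valid ≤ (plates.count it.2.2.2 : Int))
        && (((PySem.List.index? plates it.2.2.2).map (fun k => Int.ofNat k)) == some it.1)
    then some it.2 else none)

-- ===== PRECONDITION & SPEC =====
def Spec_validate_results_between_rounds (recognitions_between_rounds : List (List (Int × Int × String))) (number_of_occurrences_to_be_valid : Int) (out : List (Int × Int × String)) : Prop := out = validate_results_between_rounds_alt recognitions_between_rounds number_of_occurrences_to_be_valid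
instance (recognitions_between_rounds : List (List (Int × Int × String))) (number_of_occurrences_to_be_valid : Int) (out : List (Int × Int × String)) : Decidable (Spec_validate_results_between_rounds recognitions_between_rounds number_of_occurrences_to_be_valid out) := by unfold Spec_validate_results_between_rounds; infer_instance

-- ===== CLAIM (what is proved, stated in full; the proofs are below) =====
def Claim_equal_validate_results_between_rounds : Prop := ∀ (recognitions_between_rounds : List (List (Int × Int × String))) (number_of_occurrences_to_be_valid : Int), Dom_validate_results_between_rounds recognitions_between_rounds number_of_occurrences_to_be_valid → Spec_validate_results_between_rounds recognitions_between_rounds number_of_occurrences_to_be_valid (validate_results_between_rounds recognitions_between_rounds number_of_occurrences_to_be_valid)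

-- ===== LEMMAS AND PROOFS =====

-- abbreviation used throughout the proofs: a recognition tuple's plate string
abbrev pvPl (t : Int × Int × String) : String := t.2.2

-- A's two counting branches are one and the same insert (when the key is absent, getD is 0)
theorem pv_countA_eq_countB (d : PySem.Dict String Int) (t : Int × Int × String) :
    (if d.contains t.2.2 then d.insert t.2.2 (d.getD t.2.2 0 + 1) else d.insert t.2.2 1)
      = d.insert t.2.2 (d.getD t.2.2 0 + 1) := by
  by_cases h : d.contains t.2.2
  · simp [h]
  · simp only [Bool.not_eq_true] at h
    rw [if_neg (by simp [h]), PySem.Dict.getD_of_not_contains _ _ h]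
    norm_num

-- A's nested counting loop builds the Counter of the flattened plate list
theorem pv_countsA_eq_counter (rounds : List (List (Int × Int × String))) :
    rounds.foldl (fun d recognitions =>
        recognitions.foldl (fun d t =>
          if d.contains t.2.2 then d.insert t.2.2 (d.getD t.2.2 0 + 1)
          else d.insert t.2.2 1) d) PySem.Dict.empty
      = PySem.Dict.counter (rounds.flatten.map pvPl) := by
  have h : (fun (d : PySem.Dict String Int) (t : Int × Int × String) =>
        if d.contains t.2.2 then d.insert t.2.2 (d.getD t.2.2 0 + 1) else d.insert t.2.2 1)
      = fun d t => d.insert t.2.2 (d.getD t.2.2 0 + 1) :=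
    funext fun d => funext fun t => pv_countA_eq_countB d t
  rw [h, ← List.foldl_flatten, ← PySem.Dict.foldl_insert_getD_add_one_eq_counter, List.foldl_map]

-- a break-flagged fold ignores the rest of the list once the flag is set
theorem pv_break_stop (p : String) (recs : List (Int × Int × String))
    (acc : List (Int × Int × String)) :
    recs.foldl (fun s t => if s.2 then s else if p == t.2.2 then (s.1 ++ [t], true) else s)
        (acc, true) = (acc, true) := by
  induction recs with
  | nil => rfl
  | cons t ts ih => simpa using ih

-- the flat break-loop finds the first occurrence
theorem pv_break_flat (p : String) (L : List (Int × Int × String))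
    (acc : List (Int × Int × String)) :
    L.foldl (fun s t => if s.2 then s else if p == t.2.2 then (s.1 ++ [t], true) else s)
        (acc, false)
      = (acc ++ (L.find? (fun t => p == t.2.2)).toList,
         (L.find? (fun t => p == t.2.2)).isSome) := by
  induction L generalizing acc with
  | nil => simp
  | cons t ts ih =>
    by_cases h : p == t.2.2
    · simp only [List.foldl_cons, List.find?_cons, h, if_true, if_false, Bool.false_eq_true]
      rw [pv_break_stop]
      simp
    · simp only [Bool.not_eq_true] at h
      simp only [List.foldl_cons, List.find?_cons, h, Bool.false_eq_true, if_false]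
      exact ih acc

-- the nested break-loop equals the flat one over the flattened list
theorem pv_break_nested (p : String) (rounds : List (List (Int × Int × String)))
    (acc : List (Int × Int × String)) :
    rounds.foldl (fun (s : List (Int × Int × String) × Bool) recognitions =>
        if s.2 then s
        else recognitions.foldl (fun s t =>
          if s.2 then s else if p == t.2.2 then (s.1 ++ [t], true) else s) s)
      (acc, false)
      = rounds.flatten.foldl
          (fun s t => if s.2 then s else if p == t.2.2 then (s.1 ++ [t], true) else s)
          (acc, false) := by
  rw [List.foldl_flatten]
  apply PySem.List.foldl_congr_mem
  intro s recs _
  rcases s with ⟨a, b⟩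
  cases b
  · simp
  · rw [if_pos rfl]
    exact (pv_break_stop p recs a).symm

-- an if/append fold is filter then filterMap
theorem pv_foldl_if_append (l : List String) (ok : String → Bool)
    (g : String → Option (Int × Int × String)) (acc : List (Int × Int × String)) :
    l.foldl (fun acc k => if ok k then acc ++ (g k).toList else acc) acc
      = acc ++ (l.filter ok).filterMap g := by
  induction l generalizing acc with
  | nil => simp
  | cons k ks ih =>
    by_cases h : ok k
    · simp only [List.foldl_cons, h, if_true, List.filter_cons, List.filterMap_cons]
      rw [ih]
      cases g k <;> simp
    · simp only [List.foldl_cons, h, Bool.false_eq_true, if_false, List.filter_cons]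
      exact ih acc

theorem pv_discard_eq_filter (s : PySem.Set String) (x : String) :
    PySem.Set.discard s x = s.filter (fun y => !(y == x)) := by
  simp [PySem.Set.discard]

-- shifting the start of an enumeration is a map on the indices
theorem pv_enum_shift {α : Type} (L : List α) (s : Int) :
    PySem.List.enumerate L s = (PySem.List.enumerate L 0).map (fun p => (p.1 + s, p.2)) := by
  induction L generalizing s with
  | nil => simp
  | cons x xs ih =>
    rw [PySem.List.enumerate_cons, PySem.List.enumerate_cons, ih (s + 1), ih (0 + 1),
        List.map_cons, List.map_map]
    refine congrArg₂ _ (by norm_num) ?_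
    apply List.map_congr_left
    intro p _
    simp [Function.comp]
    ring

-- KEY LEMMA: scanning the distinct plates (first-occurrence order) through a validity test
-- and picking each plate's first match equals one enumerate/count-index comprehension.
theorem pv_distinct_eq_enum (ok : String → Bool) (L : List (Int × Int × String)) :
    ((PySem.Set.ofList (L.map pvPl)).filter ok).filterMap
        (fun p => L.find? (fun t => p == t.2.2))
      = (PySem.List.enumerate L).filterMap (fun it =>
          if ok it.2.2.2
              && (((PySem.List.index? (L.map pvPl) it.2.2.2).map (fun k => Int.ofNat k))
                    == some it.1)
          then some it.2 else none) := by
  induction L generalizing ok with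
  | nil => simp
  | cons t ts ih =>
    rw [List.map_cons, PySem.Set.ofList_cons, pv_discard_eq_filter,
        PySem.List.enumerate_cons, List.filterMap_cons]
    simp only [zero_add]
    rw [pv_enum_shift ts 1, List.filterMap_map]
    -- the head item
    have hfind_self : (t :: ts).find? (fun u => pvPl t == u.2.2) = some t := by
      simp [pvPl]
    have hidx_self : PySem.List.index? (pvPl t :: ts.map pvPl) t.2.2 = some 0 :=
      PySem.List.index?_cons_self _ _
    -- tail: rewrite the shifted condition into the ts-form with the strengthened test
    have htail :
        List.filterMap ((fun it =>
            if ok it.2.2.2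
                && (((PySem.List.index? (pvPl t :: ts.map pvPl) it.2.2.2).map
                      (fun k => Int.ofNat k)) == some it.1)
            then some it.2 else none) ∘ (fun p => (p.1 + 1, p.2)))
          (PySem.List.enumerate ts)
        = (PySem.List.enumerate ts).filterMap (fun it =>
            if (fun p => ok p && !(p == pvPl t)) it.2.2.2
                && (((PySem.List.index? (ts.map pvPl) it.2.2.2).map (fun k => Int.ofNat k))
                      == some it.1)
            then some it.2 else none) := by
      apply List.filterMap_congr
      intro it hit
      obtain ⟨k, hk, rfl⟩ := (PySem.List.mem_enumerate_iff _ _ _).mp hit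
      simp only [Function.comp]
      by_cases hp : ts[k].2.2 = pvPl t
      · rw [hp, hidx_self]
        have h1 : ((Option.map (fun k => Int.ofNat k) (some 0) : Option Int)
              == some ((0 : Int) + k + 1)) = false := by
          simp only [Option.map_some]
          rw [beq_eq_false_iff_ne]
          intro h
          have := Option.some.inj h
          rw [show Int.ofNat 0 = (0 : Int) from rfl] at this
          omega
        rw [h1]
        simp
      · rw [PySem.List.index?_cons_of_ne _ (fun h => hp h.symm)]
        cases hidx : PySem.List.index? (ts.map pvPl) ts[k].2.2 with
        | none => simp
        | some j =>
          have h2 : ((some ((j : Int) + 1) : Option Int) == some ((0 : Int) + k + 1))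
              = ((some (j : Int) : Option Int) == some ((0 : Int) + k)) := by
            rcases eq_or_ne (j : Int) ((0 : Int) + k) with h | h
            · simp [h]
            · have h1 : (j : Int) + 1 ≠ (0 : Int) + k + 1 := by omega
              simp
          simp only [Option.map_some, Int.ofNat_eq_natCast, Int.natCast_add,
            Int.natCast_one, h2]
          simp [hp]
    rw [htail, ← ih (fun p => ok p && !(p == pvPl t))]
    -- head case split and matching the LHS filter/filterMap
    have hLfilter :
        ((PySem.Set.ofList (ts.map pvPl)).filter (fun y => !(y == pvPl t))).filter ok
          = (PySem.Set.ofList (ts.map pvPl)).filter (fun p => ok p && !(p == pvPl t)) := by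
      rw [List.filter_filter]
    have hLfind :
        ((PySem.Set.ofList (ts.map pvPl)).filter (fun p => ok p && !(p == pvPl t))).filterMap
            (fun p => (t :: ts).find? (fun u => p == u.2.2))
          = ((PySem.Set.ofList (ts.map pvPl)).filter
                (fun p => ok p && !(p == pvPl t))).filterMap
            (fun p => ts.find? (fun u => p == u.2.2)) := by
      apply List.filterMap_congr
      intro p hp
      have hne : ¬(p == pvPl t) = true := by
        have := List.of_mem_filter hp
        simp only [Bool.and_eq_true, Bool.not_eq_true'] at this
        simp [this.2]
      rw [List.find?_cons_of_neg (by simpa [pvPl] using hne)]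
    by_cases hok : ok (pvPl t)
    · rw [List.filter_cons_of_pos hok, List.filterMap_cons, hfind_self]
      have hhead : (if ok t.2.2
            && (((PySem.List.index? (pvPl t :: ts.map pvPl) t.2.2).map
                  (fun k => Int.ofNat k)) == some (0 : Int))
          then some t else none) = some t := by
        rw [hidx_self]
        simp [pvPl] at hok ⊢
        exact hok
      rw [hhead, hLfilter, hLfind]
    · rw [List.filter_cons_of_neg (by simpa using hok)]
      have hhead : (if ok t.2.2
            && (((PySem.List.index? (pvPl t :: ts.map pvPl) t.2.2).map
                  (fun k => Int.ofNat k)) == some (0 : Int))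
          then some t else none) = none := by
        simp only [pvPl] at hok
        simp [hok]
      rw [hhead, hLfilter, hLfind]

-- ===== VERDICT (by name: the statement is the Claim_ definition above) =====
theorem validate_results_between_rounds_spec : Claim_equal_validate_results_between_rounds := by
  intro rounds n _
  unfold Spec_validate_results_between_rounds
  unfold validate_results_between_rounds validate_results_between_rounds_alt
  simp only [pv_countsA_eq_counter, List.flatMap_id]
  rw [PySem.Dict.items_counter]
  simp only [List.foldl_map]
  have hbody : ∀ (acc : List (Int × Int × String)) (k : String),
      k ∈ PySem.Set.ofList (rounds.flatten.map pvPl) →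
      (if (((rounds.flatten.map pvPl).count k : Int)) < n then acc
       else (rounds.foldl (fun (s : List (Int × Int × String) × Bool) recognitions =>
           if s.2 then s
           else recognitions.foldl (fun s t =>
             if s.2 then s
             else if k == t.2.2 then (s.1 ++ [t], true) else s) s) (acc, false)).1)
      = (if decide (n ≤ (((rounds.flatten.map pvPl).count k : Int)))
         then acc ++ ((rounds.flatten.find? (fun t => k == t.2.2)).toList) else acc) := by
    intro acc k _
    rw [pv_break_nested, pv_break_flat]
    by_cases h : (((rounds.flatten.map pvPl).count k : Int)) < n
    · rw [if_pos h, if_neg (by simpa using h)]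
    · rw [if_neg h, if_pos (by simpa using not_lt.mp h)]
  refine (PySem.List.foldl_congr_mem _ _ _ _ hbody).trans ?_
  rw [pv_foldl_if_append]
  rw [pv_distinct_eq_enum (fun p => decide (n ≤ (((rounds.flatten.map pvPl).count p : Int))))
      rounds.flatten]
  simp
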